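-- pv_equiv track=rewrite | github.com/ridulfo/sem-grep | embed.py | split_text_into_chapters
-- ===== SOURCE A (Python) =====
-- def split_text_into_chapters(text):
--     """
--     Finds a heading and split the text into chapters.
--     """
--
--     chapters = []
--     chapter = []
--     for line in text.splitlines():
--         if line.startswith("#"):
--             chapters.append("\n".join(chapter))
--             chapter = []
--         if line != "":
--             chapter.append(line)
--     chapters.append("\n".join(chapter))
--
--     return chapters[1:]
-- ===== SOURCE B (Python) =====
-- def split_text_into_chapters(text):
--     """
--     Single reverse pass: chapters are built back-to-front, so content before
--     the first heading is discarded naturally (no sentinel chapter, no [1:]).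
--     """
--     chapters = []
--     chapter = []
--     for line in reversed(text.splitlines()):
--         if line != "":
--             chapter = [line] + chapter
--         if line.startswith("#"):
--             chapters = ["\n".join(chapter)] + chapters
--             chapter = []
--     return chapters
-- ===== Notes on version B (the rewrite author's own statement) =====
-- stated objective: alternative
-- what changed: B traverses the lines in reverse and builds chapters back-to-front, so the content before the first heading is dropped naturally and A's sentinel first chapter plus the final [1:] slice disappear.
import Mathlib
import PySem

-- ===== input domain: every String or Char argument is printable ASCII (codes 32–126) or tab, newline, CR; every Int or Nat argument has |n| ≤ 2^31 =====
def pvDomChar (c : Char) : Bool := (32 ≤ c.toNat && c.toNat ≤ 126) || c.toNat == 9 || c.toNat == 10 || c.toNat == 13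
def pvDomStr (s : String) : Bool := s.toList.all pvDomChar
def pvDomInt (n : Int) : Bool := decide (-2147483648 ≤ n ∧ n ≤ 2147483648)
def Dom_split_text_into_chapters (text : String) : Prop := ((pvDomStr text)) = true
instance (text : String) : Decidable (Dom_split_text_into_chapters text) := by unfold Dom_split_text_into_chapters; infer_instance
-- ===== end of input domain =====

-- B builds the chapters back-to-front in one reverse pass, so the pre-heading content is
-- discarded naturally (no sentinel first chapter, no trailing [1:]); same cost, different shape.

-- ===== PORT A =====
-- A's loop body: flush on a '#' heading, then append the line if nonempty.
def pvStepA (st : List String × List String) (line : String) : List String × List String :=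
  let st1 := if PySem.Str.startswith line "#" then
    (st.1 ++ [PySem.Str.join "\n" st.2], ([] : List String)) else st
  if line ≠ "" then (st1.1, st1.2 ++ [line]) else st1

def split_text_into_chapters (text : String) : List String :=
  let st := (PySem.Str.splitlines text).foldl pvStepA ([], [])
  (st.1 ++ [PySem.Str.join "\n" st.2]).drop 1

-- ===== PORT B =====
-- B's loop body (lines are visited in reverse): prepend the line if nonempty,
-- and on a '#' heading prepend the finished chapter to the chapter list.
def pvStepB (line : String) (st : List String × List String) : List String × List String :=
  let chapter := if line ≠ "" then line :: st.2 else st.2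
  if PySem.Str.startswith line "#" then
    (PySem.Str.join "\n" chapter :: st.1, ([] : List String))
  else (st.1, chapter)

def split_text_into_chapters_alt (text : String) : List String :=
  ((PySem.Str.splitlines text).foldr pvStepB ([], [])).1

-- ===== PRECONDITION & SPEC =====
def Spec_split_text_into_chapters (text : String) (out : List String) : Prop := out = split_text_into_chapters_alt text
instance (text : String) (out : List String) : Decidable (Spec_split_text_into_chapters text out) := by unfold Spec_split_text_into_chapters; infer_instance

-- ===== CLAIM (what is proved, stated in full; the proofs are below) =====
def Claim_equal_split_text_into_chapters : Prop := ∀ (text : String), Dom_split_text_into_chapters text → Spec_split_text_into_chapters text (split_text_into_chapters text)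

-- ===== LEMMAS AND PROOFS =====

-- The whole chapters list A builds (including its sentinel head) equals B's pending
-- chapter consed onto B's chapter list, shifted by A's accumulators.
lemma pv_main (L : List String) : ∀ chs ch : List String,
    (L.foldl pvStepA (chs, ch)).1 ++ [PySem.Str.join "\n" (L.foldl pvStepA (chs, ch)).2]
      = chs ++ PySem.Str.join "\n" (ch ++ (L.foldr pvStepB ([], [])).2)
              :: (L.foldr pvStepB ([], [])).1 := by
  induction L with
  | nil => simp
  | cons l ls ih =>
    intro chs ch
    by_cases h0 : l = ""
    · subst h0
      have hs : PySem.Str.startswith "" "#" = false := by decide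
      simp only [List.foldl_cons, List.foldr_cons, pvStepA, pvStepB, hs]
      simpa using ih chs ch
    · by_cases hs : PySem.Str.startswith l "#"
      · simp only [List.foldl_cons, List.foldr_cons, pvStepA, pvStepB, hs, h0, if_pos, ne_eq]
        rw [ih]
        simp
      · simp only [List.foldl_cons, List.foldr_cons, pvStepA, pvStepB, hs, h0, ne_eq, not_false_iff, if_pos, Bool.false_eq_true]
        rw [ih]
        simp

-- ===== VERDICT (by name: the statement is the Claim_ definition above) =====
theorem split_text_into_chapters_spec : Claim_equal_split_text_into_chapters := by
  intro text _
  unfold Spec_split_text_into_chapters split_text_into_chapters split_text_into_chapters_alt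
  have h := pv_main (PySem.Str.splitlines text) [] []
  simp only [List.nil_append] at h
  simp [h]
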